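-- pv_equiv track=rewrite | github.com/alexander-belikov/article_analysis | article_analysis/parse_ent.py | parse_table_phrase
-- ===== SOURCE A (Python) =====
-- def parse_table_phrase(phrase):
--     phrase_agg = []
--     current = []
--     for p in phrase:
--         if p.isdigit() or p in ['-', '.', ':', '+']:
--             phrase_agg.append(current)
--             current = []
--         else:
--             current.append(p)
--     phrase_agg = [p for p in phrase_agg if p]
--     return phrase_agg
-- ===== SOURCE B (Python) =====
-- def parse_table_phrase(phrase):
--     def is_sep(c):
--         return c.isdigit() or c in ('-', '.', ':', '+')
--     out = []
--     rest = phrase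
--     while True:
--         i = next((k for k in range(len(rest)) if is_sep(rest[k])), None)
--         if i is None:
--             return out
--         if i > 0:
--             out.append(list(rest[:i]))
--         rest = rest[i+1:]
-- ===== Notes on version B (the rewrite author's own statement) =====
-- stated objective: alternative
-- what changed: B repeatedly finds the first separator and slices the string before it (find-and-slice recursion on the remaining suffix), instead of A's char-by-char fold into an accumulator followed by a filtering pass over the collected (possibly empty) segments.
import Mathlib
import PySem

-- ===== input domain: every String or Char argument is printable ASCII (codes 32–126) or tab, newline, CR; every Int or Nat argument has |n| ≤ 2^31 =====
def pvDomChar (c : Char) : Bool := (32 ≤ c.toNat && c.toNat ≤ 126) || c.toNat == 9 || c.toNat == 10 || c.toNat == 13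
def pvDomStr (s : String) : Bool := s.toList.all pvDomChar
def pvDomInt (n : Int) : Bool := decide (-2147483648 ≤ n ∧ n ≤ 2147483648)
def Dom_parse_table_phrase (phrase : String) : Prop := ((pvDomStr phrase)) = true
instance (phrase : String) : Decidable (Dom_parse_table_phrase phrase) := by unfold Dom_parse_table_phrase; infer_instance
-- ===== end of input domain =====

-- B replaces A's char-by-char accumulator fold (plus a final filter pass) by a
-- find-first-separator-and-slice recursion on the remaining suffix (objective: alternative).

-- ===== PORT A =====
-- separator test: p.isdigit() or p in ['-', '.', ':', '+']  (Char.isDigit is exact for ASCII chars of Dom)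
def ptpSepA (p : Char) : Bool := p.isDigit || p ∈ ['-', '.', ':', '+']

def parse_table_phrase (phrase : String) : List (List String) :=
  let st := phrase.toList.foldl
    (fun (st : List (List String) × List String) p =>
      if ptpSepA p then (st.1 ++ [st.2], [])
      else (st.1, st.2 ++ [String.ofList [p]]))
    ([], [])
  -- [p for p in phrase_agg if p] : keep non-empty segments
  st.1.filter (fun p => !p.isEmpty)

-- ===== PORT B =====
def ptpIsSep (c : Char) : Bool := c.isDigit || c ∈ ['-', '.', ':', '+']

def ptpGo (rest : List Char) : List (List String) :=
  match _h : rest.findIdx? ptpIsSep with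
  | none => []
  | some i =>
    (if i > 0 then [(rest.take i).map (fun c => String.ofList [c])] else [])
      ++ ptpGo (rest.drop (i + 1))
termination_by rest.length
decreasing_by
  have hi := (List.findIdx?_eq_some_iff_getElem.mp _h).1
  simp [List.length_drop]; omega

def parse_table_phrase_alt (phrase : String) : List (List String) :=
  ptpGo phrase.toList

-- ===== PRECONDITION & SPEC =====
def Spec_parse_table_phrase (phrase : String) (out : List (List String)) : Prop := out = parse_table_phrase_alt phrase
instance (phrase : String) (out : List (List String)) : Decidable (Spec_parse_table_phrase phrase out) := by unfold Spec_parse_table_phrase; infer_instance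

-- ===== CLAIM (what is proved, stated in full; the proofs are below) =====
def Claim_equal_parse_table_phrase : Prop := ∀ (phrase : String), Dom_parse_table_phrase phrase → Spec_parse_table_phrase phrase (parse_table_phrase phrase)

-- ===== LEMMAS AND PROOFS =====

def ptpStep (st : List (List String) × List String) (p : Char) : List (List String) × List String :=
  if ptpSepA p then (st.1 ++ [st.2], [])
  else (st.1, st.2 ++ [String.ofList [p]])

lemma ptpStep_agg (cs : List Char) (agg : List (List String)) (cur : List String) :
    cs.foldl ptpStep (agg, cur)
      = (agg ++ (cs.foldl ptpStep ([], cur)).1, (cs.foldl ptpStep ([], cur)).2) := by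
  induction cs generalizing agg cur with
  | nil => simp
  | cons c cs ih =>
    by_cases hc : ptpSepA c
    · simp only [List.foldl_cons, ptpStep, hc, if_pos, List.nil_append]
      rw [ih (agg ++ [cur]) [], ih [cur] []]
      simp
    · simp only [List.foldl_cons, ptpStep, hc, Bool.false_eq_true, if_false]
      exact ih agg (cur ++ [String.ofList [c]])

lemma ptpStep_nosep (pre : List Char) (hpre : ∀ c ∈ pre, ptpSepA c = false)
    (agg : List (List String)) (cur : List String) :
    pre.foldl ptpStep (agg, cur) = (agg, cur ++ pre.map (fun c => String.ofList [c])) := by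
  induction pre generalizing cur with
  | nil => simp
  | cons c cs ih =>
    have hc : ptpSepA c = false := hpre c (by simp)
    simp only [List.foldl_cons, ptpStep, hc, Bool.false_eq_true, if_false]
    rw [ih (fun d hd => hpre d (by simp [hd])) (cur ++ [String.ofList [c]])]
    simp

lemma ptpMain (cs : List Char) (cur : List String) :
    ((cs.foldl ptpStep ([], cur)).1).filter (fun p => !p.isEmpty)
      = (match cs.findIdx? ptpIsSep with
         | none => []
         | some i =>
            (if (cur ++ (cs.take i).map (fun c => String.ofList [c])).isEmpty then []
             else [cur ++ (cs.take i).map (fun c => String.ofList [c])])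
              ++ ptpGo (cs.drop (i + 1))) := by
  cases h : cs.findIdx? ptpIsSep with
  | none =>
    have hall : ∀ c ∈ cs, ptpSepA c = false := by
      intro c hc
      have := List.findIdx?_eq_none_iff.mp h c hc
      simpa [ptpIsSep, ptpSepA] using this
    rw [ptpStep_nosep cs hall [] cur]
    simp
  | some i =>
    obtain ⟨hi, hsep, hbefore⟩ := List.findIdx?_eq_some_iff_getElem.mp h
    have hdecomp : cs = cs.take i ++ cs[i] :: cs.drop (i + 1) := by
      conv_lhs => rw [← List.take_append_drop i cs]
      rw [List.drop_eq_getElem_cons hi]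
    have hpre : ∀ c ∈ cs.take i, ptpSepA c = false := by
      intro c hc
      obtain ⟨j, hj, rfl⟩ := List.mem_take_iff_getElem.mp hc
      have hji : j < i := by omega
      have := hbefore j hji
      simpa [ptpIsSep, ptpSepA] using this
    have hsepA : ptpSepA cs[i] = true := by simpa [ptpIsSep, ptpSepA] using hsep
    conv_lhs => rw [hdecomp]
    rw [List.foldl_append, ptpStep_nosep _ hpre [] cur]
    simp only [List.foldl_cons, ptpStep, hsepA, if_pos, List.nil_append]
    rw [ptpStep_agg (cs.drop (i+1)) _ []]
    simp only [List.filter_append]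
    have htail := ptpMain (cs.drop (i + 1)) []
    rw [htail]
    have hgo : ptpGo (cs.drop (i + 1))
        = (match (cs.drop (i+1)).findIdx? ptpIsSep with
           | none => []
           | some j =>
              (if (([] : List String) ++ ((cs.drop (i+1)).take j).map (fun c => String.ofList [c])).isEmpty then []
               else [([] : List String) ++ ((cs.drop (i+1)).take j).map (fun c => String.ofList [c])])
                ++ ptpGo ((cs.drop (i+1)).drop (j + 1))) := by
      rw [ptpGo]
      cases hj : (cs.drop (i+1)).findIdx? ptpIsSep with
      | none => simp
      | some j =>
        obtain ⟨hjlt, -, -⟩ := List.findIdx?_eq_some_iff_getElem.mp hj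
        dsimp only
        rw [List.nil_append]
        have hlen : (((cs.drop (i+1)).take j).map (fun c => String.ofList [c])).length = j := by
          rw [List.length_map, List.length_take]
          omega
        by_cases hj0 : j > 0
        · have hne : ((cs.drop (i+1)).take j).map (fun c => String.ofList [c]) ≠ [] := by
            intro hnil
            rw [hnil] at hlen
            simp at hlen
            omega
          have hfe : (((cs.drop (i+1)).take j).map (fun c => String.ofList [c])).isEmpty = false := by
            cases hx : (((cs.drop (i+1)).take j).map (fun c => String.ofList [c])).isEmpty with
            | false => rfl
            | true => exact absurd (List.isEmpty_iff.mp hx) hne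
          rw [if_pos hj0, hfe]
          simp
        · have hz : j = 0 := by omega
          subst hz
          simp
    rw [← hgo, List.filter_singleton]
    congr 1
    by_cases hcm : (cur ++ (cs.take i).map (fun c => String.ofList [c])).isEmpty = true
    · simp
    · simp
termination_by cs.length
decreasing_by simp [List.length_drop]; omega

-- ===== VERDICT (by name: the statement is the Claim_ definition above) =====
theorem parse_table_phrase_spec : Claim_equal_parse_table_phrase := by
  intro phrase _
  unfold Spec_parse_table_phrase parse_table_phrase parse_table_phrase_alt
  show ((phrase.toList.foldl ptpStep ([], [])).1).filter (fun p => !p.isEmpty) = ptpGo phrase.toList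
  rw [ptpMain phrase.toList []]
  rw [ptpGo]
  cases h : phrase.toList.findIdx? ptpIsSep with
  | none => simp
  | some i =>
    obtain ⟨hi, -, -⟩ := List.findIdx?_eq_some_iff_getElem.mp h
    simp only [List.nil_append]
    congr 1
    have hlen : ((phrase.toList.take i).map (fun c => String.ofList [c])).length = i := by
      rw [List.length_map, List.length_take]
      omega
    by_cases hi0 : i > 0
    · have hne : (phrase.toList.take i).map (fun c => String.ofList [c]) ≠ [] := by
        intro hnil
        rw [hnil] at hlen
        simp at hlen
        omega
      rw [if_neg (by simp only [List.isEmpty_iff]; exact hne), if_pos hi0]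
    · have hz : i = 0 := by omega
      subst hz
      simp
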